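-- pv_equiv track=rewrite | github.com/OlenaMazurkiewicz/Python-Advanced-30.06- | Dom_05.py | three_biggest_int
-- ===== SOURCE A (Python) =====
-- def three_biggest_int(input_list):
--     """
--     Дан массив чисел.
--     [10, 11, 2, 3, 5, 8, 23, 11, 2, 5, 76, 43, 2, 32, 76, 3, 10, 0, 1]
--     вывести 3 наибольших числа из исходного массива
--     """
--     m = 3
--
--     biggest_ints = list()
--     input_list.sort()
--
--     for _ in input_list:
--         if _ not in biggest_ints:
--             biggest_ints.append(_)
--
--     biggest_ints = biggest_ints[-m:]
--
--     return biggest_ints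
-- ===== SOURCE B (Python) =====
-- def three_biggest_int(input_list):
--     # One pass: keep the (at most 3) largest distinct values seen so far, descending.
--     # (Unlike A, does not sort input_list in place.)
--     top = []
--     for x in input_list:
--         if x in top:
--             continue
--         if len(top) < 3:
--             top.append(x)
--             top.sort(reverse=True)
--         elif x > top[2]:
--             top[2] = x
--             top.sort(reverse=True)
--     return top[::-1]
-- ===== Notes on version B (the rewrite author's own statement) =====
-- stated objective: faster
-- what changed: Replaces A's sort-whole-list + linear-membership dedup scan + [-3:] slice by a single pass that maintains the at-most-3 largest distinct values in a constant-size list.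
import Mathlib
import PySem

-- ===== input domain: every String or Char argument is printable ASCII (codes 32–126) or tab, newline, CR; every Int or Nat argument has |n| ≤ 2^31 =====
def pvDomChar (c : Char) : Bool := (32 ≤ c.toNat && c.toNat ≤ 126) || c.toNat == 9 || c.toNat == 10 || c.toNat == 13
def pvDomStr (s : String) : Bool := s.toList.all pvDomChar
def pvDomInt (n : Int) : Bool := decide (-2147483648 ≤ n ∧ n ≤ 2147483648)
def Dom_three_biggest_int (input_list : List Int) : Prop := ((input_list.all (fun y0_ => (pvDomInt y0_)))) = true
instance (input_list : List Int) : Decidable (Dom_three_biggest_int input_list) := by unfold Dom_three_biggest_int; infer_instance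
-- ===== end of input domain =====

-- B replaces A's sort + linear-membership dedup + [-3:] slice by a single pass keeping the at-most-3
-- largest distinct values (objective: faster). Python A sorts input_list IN PLACE; B does not mutate it:
-- the equivalence proved here is about the return value.

-- ===== PORT A =====
def three_biggest_int (input_list : List Int) : List Int :=
  let sorted_list := PySem.List.sorted input_list (fun x => x) false
  let biggest_ints :=
    sorted_list.foldl (fun acc x => if x ∈ acc then acc else acc ++ [x]) ([] : List Int)
  PySem.List.slice biggest_ints (some (-3)) none

-- ===== PORT B =====
-- one loop step of Source B: 'top' holds the at-most-3 largest distinct values seen so far, descending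
def tbTopStep (top : List Int) (x : Int) : List Int :=
  if x ∈ top then top
  else if top.length < 3 then PySem.List.sorted (top ++ [x]) (fun y => y) true
  else if PySem.List.pyGetD top 2 0 < x then PySem.List.sorted (PySem.List.pySetD top 2 x) (fun y => y) true
  else top

def three_biggest_int_alt (input_list : List Int) : List Int :=
  (input_list.foldl tbTopStep []).reverse

-- ===== PRECONDITION & SPEC =====
def Spec_three_biggest_int (input_list : List Int) (out : List Int) : Prop := out = three_biggest_int_alt input_list
instance (input_list : List Int) (out : List Int) : Decidable (Spec_three_biggest_int input_list out) := by unfold Spec_three_biggest_int; infer_instance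

-- ===== CLAIM (what is proved, stated in full; the proofs are below) =====
def Claim_equal_three_biggest_int : Prop := ∀ (input_list : List Int), Dom_three_biggest_int input_list → Spec_three_biggest_int input_list (three_biggest_int input_list)

-- ===== LEMMAS AND PROOFS =====

-- descending insert skipping duplicates: proof-side reference description of B's loop
def dins (x : Int) : List Int → List Int
  | [] => [x]
  | y :: ys => if y < x then x :: y :: ys else if x = y then y :: ys else y :: dins x ys

theorem mem_dins (x a : Int) (l : List Int) : a ∈ dins x l ↔ a = x ∨ a ∈ l := by
  induction l with
  | nil => simp [dins]
  | cons y ys ih =>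
    simp only [dins]
    split_ifs with h1 h2
    · simp
    · subst h2; simp
    · simp [ih]; tauto

theorem dins_of_mem (x : Int) (l : List Int)
    (hP : l.Pairwise (fun a b => b < a)) (hx : x ∈ l) : dins x l = l := by
  induction l with
  | nil => simp at hx
  | cons y ys ih =>
    rcases List.pairwise_cons.mp hP with ⟨hy, hys⟩
    rcases List.mem_cons.mp hx with h | h
    · subst h
      simp [dins]
    · have hlt : x < y := hy x h
      simp only [dins]
      rw [if_neg (by omega), if_neg (by omega), ih hys h]

theorem pairwise_dins (x : Int) (l : List Int)
    (hP : l.Pairwise (fun a b => b < a)) (hx : x ∉ l) :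
    (dins x l).Pairwise (fun a b => b < a) := by
  induction l with
  | nil => simp [dins]
  | cons y ys ih =>
    rcases List.pairwise_cons.mp hP with ⟨hy, hys⟩
    have hxy : x ≠ y := fun h => hx (h ▸ List.mem_cons_self)
    have hxys : x ∉ ys := fun h => hx (List.mem_cons_of_mem _ h)
    simp only [dins]
    by_cases h1 : y < x
    · rw [if_pos h1]
      refine List.pairwise_cons.mpr ⟨?_, hP⟩
      intro b hb
      rcases List.mem_cons.mp hb with h | h
      · omega
      · exact lt_trans (hy b h) h1
    · rw [if_neg h1, if_neg hxy]
      refine List.pairwise_cons.mpr ⟨?_, ih hys hxys⟩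
      intro b hb
      rcases (mem_dins x b ys).mp hb with h | h
      · omega
      · exact hy b h

theorem perm_dins (x : Int) (l : List Int) (hx : x ∉ l) : (dins x l).Perm (x :: l) := by
  induction l with
  | nil => simp [dins]
  | cons y ys ih =>
    have hxy : x ≠ y := fun h => hx (h ▸ List.mem_cons_self)
    have hxys : x ∉ ys := fun h => hx (List.mem_cons_of_mem _ h)
    simp only [dins]
    by_cases h1 : y < x
    · rw [if_pos h1]
    · rw [if_neg h1, if_neg hxy]
      exact ((ih hxys).cons y).trans (List.Perm.swap x y ys)

theorem length_dins (x : Int) (l : List Int) (hx : x ∉ l) : (dins x l).length = l.length + 1 := by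
  have := (perm_dins x l hx).length_eq; simpa using this

theorem afold_inv (s : List Int) :
    ∀ acc : List Int, s.Pairwise (fun a b => a ≤ b) → acc.Pairwise (fun a b => a < b) →
    (∀ a ∈ acc, ∀ y ∈ s, a ≤ y) →
    ((s.foldl (fun acc x => if x ∈ acc then acc else acc ++ [x]) acc).Pairwise (fun a b => a < b) ∧
     (∀ a, a ∈ s.foldl (fun acc x => if x ∈ acc then acc else acc ++ [x]) acc ↔ a ∈ acc ∨ a ∈ s)) := by
  induction s with
  | nil => intro acc _ hacc _; simpa using hacc
  | cons x s' ih =>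
    intro acc hs hacc hcross
    rcases List.pairwise_cons.mp hs with ⟨hx, hs'⟩
    simp only [List.foldl_cons]
    by_cases hmem : x ∈ acc
    · rw [if_pos hmem]
      have h := ih acc hs' hacc (fun a ha y hy => hcross a ha y (List.mem_cons_of_mem _ hy))
      refine ⟨h.1, fun a => ?_⟩
      rw [h.2 a]
      constructor
      · rintro (hh | hh)
        · exact Or.inl hh
        · exact Or.inr (List.mem_cons_of_mem _ hh)
      · rintro (hh | hh)
        · exact Or.inl hh
        · rcases List.mem_cons.mp hh with hh2 | hh2
          · exact Or.inl (hh2 ▸ hmem)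
          · exact Or.inr hh2
    · rw [if_neg hmem]
      have hacc' : (acc ++ [x]).Pairwise (fun a b => a < b) := by
        rw [List.pairwise_append]
        refine ⟨hacc, by simp, ?_⟩
        intro a ha b hb
        have hb' : b = x := by simpa using hb
        have h1 := hcross a ha x List.mem_cons_self
        have h2 : a ≠ x := fun h => hmem (h ▸ ha)
        omega
      have hcross' : ∀ a ∈ acc ++ [x], ∀ y ∈ s', a ≤ y := by
        intro a ha y hy
        rcases List.mem_append.mp ha with h | h
        · exact hcross a h y (List.mem_cons_of_mem _ hy)
        · have h' : a = x := by simpa using h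
          simpa [h'] using hx y hy
      have h := ih (acc ++ [x]) hs' hacc' hcross'
      refine ⟨h.1, fun a => ?_⟩
      rw [h.2 a]
      simp only [List.mem_append, List.mem_cons]
      tauto

theorem tbStep_eq (l : List Int) (x : Int) (hP : l.Pairwise (fun a b => b < a)) :
    tbTopStep (l.take 3) x = (dins x l).take 3 := by
  by_cases hx : x ∈ l
  · rw [dins_of_mem x l hP hx]
    by_cases hx3 : x ∈ l.take 3
    · simp [tbTopStep, hx3]
    · match l, hx, hx3, hP with
      | a :: b :: c :: r, hx, hx3, hP =>
        have hxr : x ∈ r := by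
          simp only [List.take, List.mem_cons, not_or] at hx3
          rcases List.mem_cons.mp hx with h|h
          · exact absurd h hx3.1
          rcases List.mem_cons.mp h with h|h
          · exact absurd h hx3.2.1
          rcases List.mem_cons.mp h with h|h
          · exact absurd h hx3.2.2.1
          · exact h
        have hca : (b < a) ∧ (c < b) ∧ (∀ y ∈ r, y < c) := by
          simp only [List.pairwise_cons] at hP
          refine ⟨hP.1 b (by simp), hP.2.1 c (by simp), fun y hy => hP.2.2.1 y hy⟩
        have hxc : x < c := hca.2.2 x hxr
        simp only [tbTopStep, List.take]
        rw [if_neg (by simpa [List.take] using hx3)]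
        rw [if_neg (by simp)]
        rw [if_neg (by simp [PySem.List.pyGetD, PySem.List.pyIdx?, PySem.List.pyGet?]; omega)]
  · have hPd := pairwise_dins x l hP hx
    match l, hx, hP, hPd with
    | [], hx, hP, hPd =>
      simp only [tbTopStep, dins, List.take]
      rw [if_neg (by simp), if_pos (by simp)]
      exact PySem.List.sorted_rev_eq_of_perm_of_pairwise_gt _ _ _ (List.Perm.refl _) (by simp)
    | [a], hx, hP, hPd =>
      simp only [List.take, tbTopStep]
      rw [if_neg (by simpa using hx), if_pos (by simp)]
      have hperm : (dins x [a]).Perm ([a] ++ [x]) :=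
        (perm_dins x [a] hx).trans (List.perm_append_singleton x [a]).symm
      rw [PySem.List.sorted_rev_eq_of_perm_of_pairwise_gt ([a] ++ [x]) (dins x [a]) (fun y => y) hperm hPd]
      rw [List.take_of_length_le (by rw [length_dins x [a] hx]; simp)]
    | [a, b], hx, hP, hPd =>
      simp only [List.take, tbTopStep]
      rw [if_neg (by simpa using hx), if_pos (by simp)]
      have hperm : (dins x [a, b]).Perm ([a, b] ++ [x]) :=
        (perm_dins x [a, b] hx).trans (List.perm_append_singleton x [a, b]).symm
      rw [PySem.List.sorted_rev_eq_of_perm_of_pairwise_gt ([a, b] ++ [x]) (dins x [a, b]) (fun y => y) hperm hPd]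
      rw [List.take_of_length_le (by rw [length_dins x [a, b] hx]; simp)]
    | a :: b :: c :: r, hx, hP, hPd =>
      have hmem : x ≠ a ∧ x ≠ b ∧ x ≠ c ∧ x ∉ r := by
        simp only [List.mem_cons, not_or] at hx; exact hx
      have hca : (b < a) ∧ (c < b) ∧ (∀ y ∈ r, y < c) := by
        simp only [List.pairwise_cons] at hP
        refine ⟨hP.1 b (by simp), hP.2.1 c (by simp), fun y hy => hP.2.2.1 y hy⟩
      obtain ⟨hba, hcb, hrc⟩ := hca
      obtain ⟨hxa, hxb, hxc, hxr⟩ := hmem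
      simp only [List.take, tbTopStep]
      rw [if_neg (by simp; omega), if_neg (by simp)]
      by_cases hcx : c < x
      · rw [if_pos (by simp [PySem.List.pyGetD, PySem.List.pyIdx?, PySem.List.pyGet?]; omega)]
        have hset : PySem.List.pySetD [a, b, c] 2 x = [a, b, x] := by
          simp [PySem.List.pySetD, PySem.List.pySet?, PySem.List.pyIdx?]
        rw [hset]
        by_cases hax : a < x
        · have hd : dins x (a :: b :: c :: r) = x :: a :: b :: c :: r := by
            simp only [dins]; rw [if_pos hax]
          rw [hd]
          apply PySem.List.sorted_rev_eq_of_perm_of_pairwise_gt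
          · exact (List.perm_append_singleton x [a, b]).symm
          · simp only [List.take, List.pairwise_cons]
            refine ⟨?_, ?_, by simp⟩ <;> intro y hy <;> simp at hy <;> omega
        · by_cases hbx : b < x
          · have hd : dins x (a :: b :: c :: r) = a :: x :: b :: c :: r := by
              simp only [dins]
              rw [if_neg hax, if_neg (by omega), if_pos hbx]
            rw [hd]
            apply PySem.List.sorted_rev_eq_of_perm_of_pairwise_gt
            · exact List.Perm.cons a (List.Perm.swap b x [])
            · simp only [List.take, List.pairwise_cons]
              refine ⟨?_, ?_, by simp⟩ <;> intro y hy <;> simp at hy <;> omega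
          · have hd : dins x (a :: b :: c :: r) = a :: b :: x :: c :: r := by
              simp only [dins]
              rw [if_neg hax, if_neg (by omega), if_neg hbx, if_neg (by omega), if_pos hcx]
            rw [hd]
            apply PySem.List.sorted_rev_eq_of_perm_of_pairwise_gt
            · exact List.Perm.refl _
            · simp only [List.take, List.pairwise_cons]
              refine ⟨?_, ?_, by simp⟩ <;> intro y hy <;> simp at hy <;> omega
      · rw [if_neg (by simp [PySem.List.pyGetD, PySem.List.pyIdx?, PySem.List.pyGet?]; omega)]
        have hd : dins x (a :: b :: c :: r) = a :: b :: c :: dins x r := by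
          simp only [dins]
          rw [if_neg (by omega), if_neg (by omega), if_neg (by omega), if_neg (by omega),
              if_neg (by omega), if_neg (by omega)]
        rw [hd]
        simp [List.take]

theorem pairwise_dins_all (x : Int) (l : List Int)
    (hP : l.Pairwise (fun a b => b < a)) : (dins x l).Pairwise (fun a b => b < a) := by
  by_cases hx : x ∈ l
  · rw [dins_of_mem x l hP hx]; exact hP
  · exact pairwise_dins x l hP hx

theorem bfold (xs : List Int) :
    ∀ l : List Int, l.Pairwise (fun a b => b < a) →
    xs.foldl tbTopStep (l.take 3) = (xs.foldl (fun l x => dins x l) l).take 3 := by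
  induction xs with
  | nil => intro l _; rfl
  | cons x xs' ih =>
    intro l hP
    simp only [List.foldl_cons]
    rw [tbStep_eq l x hP]
    exact ih (dins x l) (pairwise_dins_all x l hP)

theorem dfold_inv (xs : List Int) :
    ∀ l : List Int, l.Pairwise (fun a b => b < a) →
    ((xs.foldl (fun l x => dins x l) l).Pairwise (fun a b => b < a) ∧
     (∀ a, a ∈ xs.foldl (fun l x => dins x l) l ↔ a ∈ l ∨ a ∈ xs)) := by
  induction xs with
  | nil => intro l hP; simpa using hP
  | cons x xs' ih =>
    intro l hP
    simp only [List.foldl_cons]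
    have h := ih (dins x l) (pairwise_dins_all x l hP)
    refine ⟨h.1, fun a => ?_⟩
    rw [h.2 a, mem_dins]
    simp only [List.mem_cons]
    tauto

theorem afold_eq_reverse_dfold (xs : List Int) :
    (PySem.List.sorted xs (fun x => x) false).foldl
        (fun acc x => if x ∈ acc then acc else acc ++ [x]) []
      = (xs.foldl (fun l x => dins x l) []).reverse := by
  set s := PySem.List.sorted xs (fun x => x) false with hs
  set bi := s.foldl (fun acc x => if x ∈ acc then acc else acc ++ [x]) [] with hbi
  set Ld := xs.foldl (fun l x => dins x l) [] with hLd
  have hsp : s.Pairwise (fun a b => a ≤ b) := PySem.List.sorted_pairwise xs (fun x => x)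
  have ha := afold_inv s [] hsp (by simp) (by simp)
  have hd := dfold_inv xs [] (by simp)
  have hmems : ∀ a, a ∈ s ↔ a ∈ xs := fun a => PySem.List.mem_sorted xs (fun x => x) false a
  have hbirevP : bi.reverse.Pairwise (fun a b => b < a) := by
    rw [List.pairwise_reverse]; exact ha.1
  have hmem : ∀ a, a ∈ bi.reverse ↔ a ∈ Ld := by
    intro a
    rw [List.mem_reverse, ha.2 a, hd.2 a, hmems a]
  have hnd1 : bi.reverse.Nodup := hbirevP.imp (fun h => ne_of_gt h)
  have hnd2 : Ld.Nodup := hd.1.imp (fun h => ne_of_gt h)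
  have hperm : bi.reverse.Perm Ld := (List.perm_ext_iff_of_nodup hnd1 hnd2).mpr hmem
  have h1 := PySem.List.sorted_rev_eq_of_perm_of_pairwise_gt Ld bi.reverse (fun y => y) hperm hbirevP
  have h2 := PySem.List.sorted_rev_eq_of_perm_of_pairwise_gt Ld Ld (fun y => y) (List.Perm.refl _) hd.1
  have hfin : bi.reverse = Ld := h1.symm.trans h2
  rw [← hfin, List.reverse_reverse]

-- ===== VERDICT (by name: the statement is the Claim_ definition above) =====
theorem three_biggest_int_spec : Claim_equal_three_biggest_int := by
  unfold Claim_equal_three_biggest_int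
  intro xs _
  show three_biggest_int xs = three_biggest_int_alt xs
  show PySem.List.slice
      ((PySem.List.sorted xs (fun x => x) false).foldl
        (fun acc x => if x ∈ acc then acc else acc ++ [x]) ([] : List Int))
      (some (-3)) none
    = (xs.foldl tbTopStep []).reverse
  rw [afold_eq_reverse_dfold xs]
  rw [PySem.List.slice_from_neg_ofNat _ 3 (by omega)]
  have hb : xs.foldl tbTopStep [] = (xs.foldl (fun l x => dins x l) []).take 3 := by
    have h := bfold xs [] (by simp)
    simpa using h
  rw [hb, List.length_reverse]
  exact Eq.symm List.reverse_take
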